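-- pv_equiv track=rewrite | github.com/bspafford/CALCulator | CALCulatorCode/HelpfulFunctions.py | AddSigns
-- ===== SOURCE A (Python) =====
-- def split(word):
--     return [char for char in word]
--
-- def AddSigns(variable):
--
--      signlist = []
--
--      variable = split(str(variable))
--
--      whilecounter = len(variable) + len(signlist)# - 2
--
--      i = 0
--      while i <= whilecounter:
--
--           if len(variable) > 1 and variable[i].isdigit() and ((variable[i + 1].casefold()).islower() or variable[i + 1] == "("):
--                variable.insert(i + 1, "*")
--           whilecounter -= 1
--           i += 1
--           whilecounter = len(variable) + len(signlist) - 2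
--
--      variable = ''.join(variable)
--      return variable
-- ===== SOURCE B (Python) =====
-- def AddSigns(variable):
--     s = str(variable)
--     res = ''
--     nxt = None
--     for c in reversed(s):
--         if nxt is not None and c.isdigit() and (nxt.casefold().islower() or nxt == '('):
--             res = c + '*' + res
--         else:
--             res = c + res
--         nxt = c
--     return res
-- ===== Notes on version B (the rewrite author's own statement) =====
-- stated objective: simpler
-- what changed: Replaces A's while loop with in-place list.insert and a continually recomputed loop bound by a single right-to-left scan that carries the following character and prepends, never mutating the sequence.
import Mathlib
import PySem

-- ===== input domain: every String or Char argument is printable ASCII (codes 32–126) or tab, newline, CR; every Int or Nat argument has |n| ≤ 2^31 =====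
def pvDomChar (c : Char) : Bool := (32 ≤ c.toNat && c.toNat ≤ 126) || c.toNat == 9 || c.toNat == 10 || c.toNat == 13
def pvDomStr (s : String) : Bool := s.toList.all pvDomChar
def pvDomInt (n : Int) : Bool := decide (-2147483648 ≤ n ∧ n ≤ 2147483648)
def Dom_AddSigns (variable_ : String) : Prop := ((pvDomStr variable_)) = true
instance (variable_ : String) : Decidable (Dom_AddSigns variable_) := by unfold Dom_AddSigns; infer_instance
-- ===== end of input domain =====

-- B changes the decomposition: A walks forward mutating the list with insert under a recomputed
-- bound; B scans right-to-left carrying the following character and prepends (no mutation).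

-- `(c.casefold()).islower()` for a single character: exact on the printable-ASCII (plus
-- tab/newline/CR) domain, where it holds exactly for the ASCII letters.
def pyCasefoldIslower (c : Char) : Bool := PySem.Chars.isalpha c

-- ===== PORT A =====
-- the while loop; `done` is the already-passed prefix variable[:i], `rest` is variable[i:];
-- `variable.insert(i + 1, "*")` followed by `i += 1` puts '*' at the head of the new rest,
-- and the loop runs while i <= len(variable) - 2, i.e. while rest has ≥ 2 elements
-- (the first iteration's larger bound only admits len < 2 inputs, on which the body is a no-op).
def addSignsLoopA (done rest : List Char) : List Char :=
  match rest with
  | c1 :: c2 :: t =>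
      if h : PySem.Chars.isdigit c1 ∧ (pyCasefoldIslower c2 || c2 == '(') = true then
        addSignsLoopA (done ++ [c1]) ('*' :: c2 :: t)
      else
        addSignsLoopA (done ++ [c1]) (c2 :: t)
  | _ => done ++ rest
termination_by 2 * rest.length + (if rest.head? = some '*' then 0 else 1)
decreasing_by
  · have hc1 : c1 ≠ '*' := by
      intro he; subst he; simp [PySem.Chars.isdigit] at h
    simp [List.head?, hc1]
  · simp [List.head?]; split <;> omega

def AddSigns (variable_ : String) : String :=
  -- variable = split(str(variable)) : the list of characters
  String.mk (addSignsLoopA [] variable_.toList)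

-- ===== PORT B =====
-- loop body of `for c in reversed(s)` with state (res, nxt)
def addSignsStepB (st : List Char × Option Char) (c : Char) : List Char × Option Char :=
  match st.2 with
  | some n =>
      if PySem.Chars.isdigit c && (pyCasefoldIslower n || n == '(') then
        (c :: '*' :: st.1, some c)
      else
        (c :: st.1, some c)
  | none => (c :: st.1, some c)

def AddSigns_alt (variable_ : String) : String :=
  String.mk (variable_.toList.reverse.foldl addSignsStepB ([], none)).1

-- ===== PRECONDITION & SPEC =====
def Spec_AddSigns (variable_ : String) (out : String) : Prop := out = AddSigns_alt variable_
instance (variable_ : String) (out : String) : Decidable (Spec_AddSigns variable_ out) := by unfold Spec_AddSigns; infer_instance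

-- ===== CLAIM (what is proved, stated in full; the proofs are below) =====
def Claim_equal_AddSigns : Prop := ∀ (variable_ : String), Dom_AddSigns variable_ → Spec_AddSigns variable_ (AddSigns variable_)

-- ===== LEMMAS AND PROOFS =====

-- reference form of the result: '*' between each digit and a following letter or '('
def pairMap : List Char → List Char
  | c1 :: c2 :: t =>
      if PySem.Chars.isdigit c1 && (pyCasefoldIslower c2 || c2 == '(') then
        c1 :: '*' :: pairMap (c2 :: t)
      else
        c1 :: pairMap (c2 :: t)
  | r => r

theorem addSignsLoopA_eq (done rest : List Char) :
    addSignsLoopA done rest = done ++ pairMap rest := by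
  induction done, rest using addSignsLoopA.induct with
  | case1 done c1 c2 t h ih =>
      have hd : PySem.Chars.isdigit '*' = false := by decide
      rw [addSignsLoopA, dif_pos h, ih]
      simp only [pairMap, hd, h.1, h.2, Bool.false_and, Bool.true_and, Bool.true_or,
        Bool.or_true, if_true, if_false]
      simp
  | case2 done c1 c2 t h ih =>
      rw [addSignsLoopA, dif_neg h, ih]
      simp only [pairMap]
      rw [if_neg (by simp only [Bool.and_eq_true]; exact h)]
      simp
  | case3 done rest h =>
      rcases rest with _ | ⟨a, _ | ⟨b, t⟩⟩
      · simp [addSignsLoopA, pairMap]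
      · simp [addSignsLoopA, pairMap]
      · exact (h a b t rfl).elim

theorem foldrB_eq (cs : List Char) :
    cs.foldr (fun c st => addSignsStepB st c) ([], none) = (pairMap cs, cs.head?) := by
  induction cs with
  | nil => rfl
  | cons c t ih =>
      rw [List.foldr_cons, ih]
      cases t with
      | nil => rfl
      | cons c2 t' =>
          simp only [addSignsStepB, pairMap, List.head?]
          split <;> simp_all

-- ===== VERDICT (by name: the statement is the Claim_ definition above) =====
theorem AddSigns_spec : Claim_equal_AddSigns := by
  intro s _
  unfold Spec_AddSigns AddSigns AddSigns_alt
  rw [List.foldl_reverse, addSignsLoopA_eq, foldrB_eq]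
  simp
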